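-- pv_equiv track=rewrite | github.com/kowinhtike/BurmeseNameToMyanEnglish | Generator.py | parse_double_word
-- ===== SOURCE A (Python) =====
-- def parse_double_word(input_text):
--   double_word_list = ["hh","ww","tt"]
--   ans = ""
--   ans = input_text
--   for word in double_word_list:
--     if word in input_text:
--        ans = ans.replace(word,word[0:1])
--   return ans
-- ===== SOURCE B (Python) =====
-- def parse_double_word(input_text):
--     pairs = ("hh", "ww", "tt")
--     out = []
--     i = 0
--     n = len(input_text)
--     while i < n:
--         if input_text[i:i+2] in pairs:
--             out.append(input_text[i])
--             i += 2
--         else: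
--             out.append(input_text[i])
--             i += 1
--     return "".join(out)
-- ===== Notes on version B (the rewrite author's own statement) =====
-- stated objective: alternative
-- what changed: Replaced A's three sequential guarded str.replace passes (one per pattern hh/ww/tt) with a single left-to-right index scan that checks the 2-char window against the three pairs, consuming two characters on a match and one otherwise.
import Mathlib
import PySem

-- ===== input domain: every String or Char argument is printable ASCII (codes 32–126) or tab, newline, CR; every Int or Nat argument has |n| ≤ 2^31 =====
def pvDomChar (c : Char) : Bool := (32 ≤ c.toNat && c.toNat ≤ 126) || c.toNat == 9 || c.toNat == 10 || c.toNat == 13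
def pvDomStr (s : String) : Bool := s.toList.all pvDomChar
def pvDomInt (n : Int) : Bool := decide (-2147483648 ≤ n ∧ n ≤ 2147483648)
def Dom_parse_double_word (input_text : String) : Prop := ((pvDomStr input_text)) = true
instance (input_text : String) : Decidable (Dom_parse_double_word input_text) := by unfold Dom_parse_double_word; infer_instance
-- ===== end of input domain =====

-- B replaces A's three sequential str.replace passes by one left-to-right scan that collapses hh/ww/tt as it goes (alternative decomposition, same result).

-- ===== PORT A =====
def parse_double_word (input_text : String) : String :=
  let double_word_list : List String := ["hh", "ww", "tt"]
  let ans : String := ""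
  let ans : String := input_text
  double_word_list.foldl
    (fun ans word =>
      if PySem.Str.isIn word input_text then
        PySem.Str.replace ans word (PySem.Str.slice word (some 0) (some 1))
      else ans)
    ans

-- ===== PORT B =====
-- the while loop of Source B: look at the 2-char window, consume 2 chars on a match, else 1
def pvScanB : List Char → List Char
  | [] => []
  | [a] => [a]
  | a :: b :: t =>
    if [a, b] ∈ ([['h', 'h'], ['w', 'w'], ['t', 't']] : List (List Char)) then
      a :: pvScanB t
    else
      a :: pvScanB (b :: t)

def parse_double_word_alt (input_text : String) : String :=
  String.ofList (pvScanB input_text.toList)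

-- ===== PRECONDITION & SPEC =====
def Spec_parse_double_word (input_text : String) (out : String) : Prop := out = parse_double_word_alt input_text
instance (input_text : String) (out : String) : Decidable (Spec_parse_double_word input_text out) := by unfold Spec_parse_double_word; infer_instance

-- ===== CLAIM (what is proved, stated in full; the proofs are below) =====
def Claim_equal_parse_double_word : Prop := ∀ (input_text : String), Dom_parse_double_word input_text → Spec_parse_double_word input_text (parse_double_word input_text)

-- ===== LEMMAS AND PROOFS =====

def pvCol (c : Char) : List Char → List Char
  | [] => []
  | [a] => [a]
  | a :: b :: t => if a = c ∧ b = c then c :: pvCol c t else a :: pvCol c (b :: t)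

theorem pvReplace_go_eq (c : Char) :
    ∀ (fuel : Nat) (l acc : List Char), l.length ≤ fuel →
      PySem.Chars.replace.go [c, c] [c] fuel l acc = acc.reverse ++ pvCol c l := by
  intro fuel
  induction fuel with
  | zero =>
    intro l acc h
    have : l = [] := List.length_eq_zero_iff.mp (Nat.le_zero.mp h)
    subst this
    simp [PySem.Chars.replace.go, pvCol]
  | succ n ih =>
    intro l acc h
    match l with
    | [] => simp [PySem.Chars.replace.go, pvCol]
    | [a] =>
      have hpre : ([c, c].isPrefixOf [a]) = false := by
        simp [List.isPrefixOf]
      simp only [PySem.Chars.replace.go, hpre, Bool.false_eq_true, if_false]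
      rw [ih [] (a :: acc) (by simp)]
      simp [pvCol]
    | a :: b :: t =>
      by_cases hab : a = c ∧ b = c
      · have hpre : ([c, c].isPrefixOf (a :: b :: t)) = true := by
          simp [List.isPrefixOf, hab.1, hab.2]
        have ht : t.length ≤ n := by simp at h; omega
        simp only [PySem.Chars.replace.go, hpre, if_true, List.length_cons,
          List.length_nil, List.drop_succ_cons, List.drop_zero, List.reverse_cons,
          List.reverse_nil, List.nil_append, List.cons_append]
        rw [ih t (c :: acc) ht]
        simp [pvCol, hab.1, hab.2]
      · have hpre : ([c, c].isPrefixOf (a :: b :: t)) = false := by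
          simp [List.isPrefixOf]
          intro hac hbc
          exact hab ⟨hac.symm ▸ rfl, hbc.symm ▸ rfl⟩
        simp only [PySem.Chars.replace.go, hpre, Bool.false_eq_true, if_false]
        rw [ih (b :: t) (a :: acc) (by simp at h ⊢; omega)]
        simp [pvCol, hab]

theorem pvReplace_eq_col (c : Char) (s : List Char) :
    PySem.Chars.replace s [c, c] [c] = pvCol c s := by
  rw [PySem.Chars.replace]
  simp only [List.isEmpty, Bool.false_eq_true, if_false]
  exact pvReplace_go_eq c s.length s [] (le_refl _)

theorem pvCol_head? (c : Char) (s : List Char) : (pvCol c s).head? = s.head? := by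
  match s with
  | [] => simp [pvCol]
  | [a] => simp [pvCol]
  | a :: b :: t =>
    by_cases hab : a = c ∧ b = c
    · simp [pvCol, hab]
    · simp [pvCol, hab]

def pvScanP (P : Char → Prop) [DecidablePred P] : List Char → List Char
  | [] => []
  | [a] => [a]
  | a :: b :: t => if a = b ∧ P a then a :: pvScanP P t else a :: pvScanP P (b :: t)

theorem pvScanP_head? (P : Char → Prop) [DecidablePred P] (s : List Char) :
    (pvScanP P s).head? = s.head? := by
  match s with
  | [] => simp [pvScanP]
  | [a] => simp [pvScanP]
  | a :: b :: t =>
    by_cases hab : a = b ∧ P a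
    · simp [pvScanP, hab]
      split <;> simp
    · simp [pvScanP, hab]

theorem pvCol_pair_infix (c : Char) :
    ∀ (n : Nat) (s : List Char), s.length ≤ n → ∀ (x y : Char),
      [x, y] <:+: pvCol c s → [x, y] <:+: s := by
  intro n
  induction n with
  | zero =>
    intro s hs x y h
    have : s = [] := List.length_eq_zero_iff.mp (Nat.le_zero.mp hs)
    subst this
    simp [pvCol] at h
  | succ n ih =>
    intro s hs x y h
    match s with
    | [] => simp [pvCol] at h
    | [a] =>
      simp [pvCol] at h
      have := h.length_le
      simp at this
    | a :: b :: t =>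
      by_cases hab : a = c ∧ b = c
      · rw [pvCol, if_pos hab] at h
        rcases List.infix_cons_iff.mp h with hpre | htail
        · rcases List.cons_prefix_cons.mp hpre with ⟨hx, hy⟩
          -- [y] <+: pvCol c t, so t begins with y
          have hhd : (pvCol c t).head? = t.head? := pvCol_head? c t
          match t, hy with
          | t, hy =>
            rcases ht : pvCol c t with _ | ⟨z, r⟩
            · rw [ht] at hy; exact absurd hy (by simp)
            · rw [ht] at hy
              rcases List.cons_prefix_cons.mp hy with ⟨hz, -⟩
              have : t.head? = some z := by rw [← pvCol_head? c t, ht]; simp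
              rcases t with _ | ⟨w, t'⟩
              · simp at this
              · simp at this
                subst this hz hx
                -- goal: [c, y] <:+: a :: b :: y :: t'  with a = c, b = c
                exact ⟨[a], t', by simp [hab.1, hab.2]⟩
        · have := ih t (by simp at hs; omega) x y htail
          exact this.trans ⟨[a, b], [], by simp⟩
      · rw [pvCol, if_neg hab] at h
        rcases List.infix_cons_iff.mp h with hpre | htail
        · rcases List.cons_prefix_cons.mp hpre with ⟨hx, hy⟩
          rcases hb : pvCol c (b :: t) with _ | ⟨z, r⟩
          · rw [hb] at hy; exact absurd hy (by simp)
          · rw [hb] at hy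
            rcases List.cons_prefix_cons.mp hy with ⟨hz, -⟩
            have : (b :: t).head? = some z := by rw [← pvCol_head? c (b :: t), hb]; simp
            simp at this
            subst this hz hx
            exact ⟨[], t, by simp⟩
        · have := ih (b :: t) (by simp at hs ⊢; omega) x y htail
          exact this.trans ⟨[a], [], by simp⟩

theorem pvCol_of_not_infix (c : Char) :
    ∀ (n : Nat) (s : List Char), s.length ≤ n → ¬ [c, c] <:+: s → pvCol c s = s := by
  intro n
  induction n with
  | zero =>
    intro s hs _
    have : s = [] := List.length_eq_zero_iff.mp (Nat.le_zero.mp hs)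
    subst this; simp [pvCol]
  | succ n ih =>
    intro s hs h
    match s with
    | [] => simp [pvCol]
    | [a] => simp [pvCol]
    | a :: b :: t =>
      by_cases hab : a = c ∧ b = c
      · exact absurd ⟨[], t, by simp [hab.1, hab.2]⟩ h
      · rw [pvCol, if_neg hab]
        have : ¬ [c, c] <:+: (b :: t) := fun hcc => h (hcc.trans ⟨[a], [], by simp⟩)
        rw [ih (b :: t) (by simp at hs ⊢; omega) this]

theorem pvScanP_false :
    ∀ (n : Nat) (s : List Char), s.length ≤ n → pvScanP (fun _ => False) s = s := by
  intro n
  induction n with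
  | zero =>
    intro s hs
    have : s = [] := List.length_eq_zero_iff.mp (Nat.le_zero.mp hs)
    subst this; simp [pvScanP]
  | succ n ih =>
    intro s hs
    match s with
    | [] => simp [pvScanP]
    | [a] => simp [pvScanP]
    | a :: b :: t =>
      rw [pvScanP, if_neg (by simp)]
      rw [ih (b :: t) (by simp at hs ⊢; omega)]

theorem pvCol_cons_ne (c a : Char) (l : List Char) (h : a ≠ c) :
    pvCol c (a :: l) = a :: pvCol c l := by
  match l with
  | [] => simp [pvCol]
  | x :: xs => rw [pvCol, if_neg (fun hh => h hh.1)]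

theorem pvFuse (P : Char → Prop) [DecidablePred P] (c : Char) (hc : ¬ P c) :
    ∀ (n : Nat) (s : List Char), s.length ≤ n →
      pvCol c (pvScanP P s) = pvScanP (fun x => P x ∨ x = c) s := by
  intro n
  induction n with
  | zero =>
    intro s hs
    have : s = [] := List.length_eq_zero_iff.mp (Nat.le_zero.mp hs)
    subst this; simp [pvScanP, pvCol]
  | succ n ih =>
    intro s hs
    match s with
    | [] => simp [pvScanP, pvCol]
    | [a] => simp [pvScanP, pvCol]
    | a :: b :: t =>
      have hst : t.length ≤ n := by simp at hs; omega
      have hsbt : (b :: t).length ≤ n := by simp at hs ⊢; omega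
      by_cases hab : a = b ∧ P a
      · have hac : a ≠ c := fun hh => hc (hh ▸ hab.2)
        rw [pvScanP, if_pos hab, pvScanP, if_pos (⟨hab.1, Or.inl hab.2⟩ :
          a = b ∧ (P a ∨ a = c))]
        rw [pvCol_cons_ne c a _ hac, ih t hst]
      · by_cases habc : a = c ∧ b = c
        · obtain ⟨ha, hb⟩ := habc
          match t with
          | [] =>
            rw [pvScanP, if_neg hab]
            simp [pvScanP, pvCol, ha, hb]
          | x :: t' =>
            rw [pvScanP, if_neg hab]
            rw [pvScanP, if_neg (fun hh => hc (hb ▸ hh.2))]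
            rw [pvCol, if_pos ⟨ha, hb⟩]
            rw [ih (x :: t') hst]
            rw [pvScanP, if_pos ⟨ha.trans hb.symm, Or.inr ha⟩, ha]
        · rw [pvScanP, if_neg hab]
          rw [pvScanP, if_neg (fun hh => hh.2.elim (fun h2 => hab ⟨hh.1, h2⟩)
            (fun h2 => habc ⟨h2, hh.1 ▸ h2⟩))]
          by_cases hac : a = c
          · have hbc : b ≠ c := fun hh => habc ⟨hac, hh⟩
            rcases hsp : pvScanP P (b :: t) with _ | ⟨z, r⟩
            · have hh : (pvScanP P (b :: t)).head? = some b := by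
                rw [pvScanP_head?]; simp
              rw [hsp] at hh; simp at hh
            · have hz : z = b := by
                have hh : (pvScanP P (b :: t)).head? = some b := by
                  rw [pvScanP_head?]; simp
                rw [hsp] at hh; simpa using hh
              rw [pvCol, if_neg (fun hh => hbc (hz ▸ hh.2)), ← hsp,
                ih (b :: t) hsbt]
          · rcases hsp : pvScanP P (b :: t) with _ | ⟨z, r⟩
            · have hh : (pvScanP P (b :: t)).head? = some b := by
                rw [pvScanP_head?]; simp
              rw [hsp] at hh; simp at hh
            · rw [pvCol, if_neg (fun hh => hac hh.1), ← hsp,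
                ih (b :: t) hsbt]

theorem pvScanB_eq_scanP :
    ∀ (n : Nat) (s : List Char), s.length ≤ n →
      pvScanB s = pvScanP (fun x => ((False ∨ x = 'h') ∨ x = 'w') ∨ x = 't') s := by
  intro n
  induction n with
  | zero =>
    intro s hs
    have : s = [] := List.length_eq_zero_iff.mp (Nat.le_zero.mp hs)
    subst this; simp [pvScanB, pvScanP]
  | succ n ih =>
    intro s hs
    match s with
    | [] => simp [pvScanB, pvScanP]
    | [a] => simp [pvScanB, pvScanP]
    | a :: b :: t =>
      have hiff : ([a, b] ∈ ([['h', 'h'], ['w', 'w'], ['t', 't']] : List (List Char)))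
          ↔ (a = b ∧ (((False ∨ a = 'h') ∨ a = 'w') ∨ a = 't')) := by
        simp only [List.mem_cons, List.not_mem_nil, or_false, List.cons.injEq,
          and_true, false_or]
        constructor
        · rintro (⟨rfl, rfl⟩ | ⟨rfl, rfl⟩ | ⟨rfl, rfl⟩) <;> simp
        · rintro ⟨rfl, (h | h) | h⟩ <;> simp [h]
      by_cases hm : [a, b] ∈ ([['h', 'h'], ['w', 'w'], ['t', 't']] : List (List Char))
      · rw [pvScanB, if_pos hm, pvScanP, if_pos (hiff.mp hm),
          ih t (by simp at hs; omega)]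
      · rw [pvScanB, if_neg hm, pvScanP, if_neg (fun hh => hm (hiff.mpr hh)),
          ih (b :: t) (by simp at hs ⊢; omega)]

theorem pvColId (c : Char) (s : List Char) (h : ¬ [c, c] <:+: s) : pvCol c s = s :=
  pvCol_of_not_infix c s.length s le_rfl h

theorem pvPair (c x y : Char) (s : List Char) (h : [x, y] <:+: pvCol c s) :
    [x, y] <:+: s :=
  pvCol_pair_infix c s.length s le_rfl x y h

theorem main_spec (input : String) : parse_double_word input = parse_double_word_alt input := by
  have hrep : ∀ (x : String) (c : Char) (w : String), w.toList = [c, c] →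
      PySem.Str.replace x w (String.ofList [c]) = String.ofList (pvCol c x.toList) := by
    intro x c w hw
    have h0 : PySem.Str.replace x w (String.ofList [c])
        = String.ofList (PySem.Chars.replace x.toList w.toList (String.ofList [c]).toList) := rfl
    rw [h0, String.toList_ofList, hw, pvReplace_eq_col]
  have hIn : ∀ (w : String) (c : Char), w.toList = [c, c] →
      (PySem.Str.isIn w input = false → ¬ [c, c] <:+: input.toList) := by
    intro w c hw hfalse
    rw [PySem.Str.isIn_eq, hw] at hfalse
    exact (PySem.Chars.isIn_eq_false_iff _ _).mp hfalse
  set L := input.toList with hL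
  simp only [parse_double_word, parse_double_word_alt, List.foldl_cons, List.foldl_nil]
  rw [pvScanB_eq_scanP L.length L le_rfl]
  have f0 : pvScanP (fun _ => False) L = L := pvScanP_false L.length L le_rfl
  have f1 : pvCol 'h' (pvScanP (fun _ => False) L)
      = pvScanP (fun x => False ∨ x = 'h') L := pvFuse _ 'h' (by simp) L.length L le_rfl
  have f2 : pvCol 'w' (pvScanP (fun x => False ∨ x = 'h') L)
      = pvScanP (fun x => (False ∨ x = 'h') ∨ x = 'w') L :=
    pvFuse _ 'w' (by simp) L.length L le_rfl
  have f3 : pvCol 't' (pvScanP (fun x => (False ∨ x = 'h') ∨ x = 'w') L)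
      = pvScanP (fun x => ((False ∨ x = 'h') ∨ x = 'w') ∨ x = 't') L :=
    pvFuse _ 't' (by simp) L.length L le_rfl
  rw [← f3, ← f2, ← f1, f0]
  have hslice_h : PySem.Str.slice "hh" (some 0) (some 1) = String.ofList ['h'] := by decide
  have hslice_w : PySem.Str.slice "ww" (some 0) (some 1) = String.ofList ['w'] := by decide
  have hslice_t : PySem.Str.slice "tt" (some 0) (some 1) = String.ofList ['t'] := by decide
  have step1 : (if PySem.Str.isIn "hh" input = true then
        PySem.Str.replace input "hh" (PySem.Str.slice "hh" (some 0) (some 1)) else input)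
      = String.ofList (pvCol 'h' L) := by
    by_cases h1 : PySem.Str.isIn "hh" input = true
    · rw [if_pos h1, hslice_h, hrep input 'h' "hh" (by decide)]
    · rw [if_neg h1, pvColId 'h' L (hIn "hh" 'h' (by decide)
        (Bool.not_eq_true _ ▸ eq_false_of_ne_true h1)), hL, String.ofList_toList]
  rw [step1]
  have step2 : (if PySem.Str.isIn "ww" input = true then
        PySem.Str.replace (String.ofList (pvCol 'h' L)) "ww" (PySem.Str.slice "ww" (some 0) (some 1))
      else String.ofList (pvCol 'h' L))
      = String.ofList (pvCol 'w' (pvCol 'h' L)) := by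
    by_cases h2 : PySem.Str.isIn "ww" input = true
    · rw [if_pos h2, hslice_w, hrep _ 'w' "ww" (by decide), String.toList_ofList]
    · rw [if_neg h2]
      have hnot : ¬ ['w', 'w'] <:+: pvCol 'h' L :=
        fun hh => hIn "ww" 'w' (by decide) (eq_false_of_ne_true h2) (pvPair _ _ _ _ hh)
      rw [pvColId 'w' _ hnot]
  rw [step2]
  have step3 : (if PySem.Str.isIn "tt" input = true then
        PySem.Str.replace (String.ofList (pvCol 'w' (pvCol 'h' L))) "tt" (PySem.Str.slice "tt" (some 0) (some 1))
      else String.ofList (pvCol 'w' (pvCol 'h' L)))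
      = String.ofList (pvCol 't' (pvCol 'w' (pvCol 'h' L))) := by
    by_cases h3 : PySem.Str.isIn "tt" input = true
    · rw [if_pos h3, hslice_t, hrep _ 't' "tt" (by decide), String.toList_ofList]
    · rw [if_neg h3]
      have hnot : ¬ ['t', 't'] <:+: pvCol 'w' (pvCol 'h' L) :=
        fun hh => hIn "tt" 't' (by decide) (eq_false_of_ne_true h3)
          (pvPair _ _ _ _ (pvPair _ _ _ _ hh))
      rw [pvColId 't' _ hnot]
  rw [step3]

-- ===== VERDICT (by name: the statement is the Claim_ definition above) =====
theorem parse_double_word_spec : Claim_equal_parse_double_word := by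
  intro input_text _
  unfold Spec_parse_double_word
  exact main_spec input_text
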